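-- pv_equiv track=rewrite | github.com/yohell/msaview | src/msaview_plugin_pymol/mplug_pymol.py | fix_indent
-- ===== SOURCE A (Python) =====
-- def fix_indent(text):
--     lines = []
--     for line in text.splitlines():
--         if not lines and not line.strip():
--             continue
--         if not lines:
--             indent = len(line) - len(line.lstrip())
--         lines.append(line[indent:])
--     while lines and not lines[-1].strip():
--         lines.pop(-1)
--     return '\n'.join(lines) + '\n'
-- ===== SOURCE B (Python) =====
-- def fix_indent(text):
--     chunks = []   # committed output pieces
--     tail = []     # pieces after the last non-blank line, dropped if nothing non-blank follows
--     indent = None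
--     for line in text.splitlines():
--         if indent is None:
--             if not line.strip():
--                 continue
--             indent = len(line) - len(line.lstrip())
--             chunks.append(line[indent:])
--             continue
--         cut = line[indent:]
--         tail.append('\n' + cut)
--         if cut.strip():
--             chunks += tail
--             tail = []
--     return ''.join(chunks) + '\n'
-- ===== Notes on version B (the rewrite author's own statement) =====
-- stated objective: alternative
-- what changed: A accumulates a list of dedented lines, then pops trailing blank lines and joins them with newline separators; B never builds that list: it emits output pieces directly, holding the pieces after the last non-blank line in a deferred tail buffer that is committed on the next non-blank line and simply discarded at the end, so there is no trailing-trim pass and no join over a line list.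
import Mathlib
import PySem

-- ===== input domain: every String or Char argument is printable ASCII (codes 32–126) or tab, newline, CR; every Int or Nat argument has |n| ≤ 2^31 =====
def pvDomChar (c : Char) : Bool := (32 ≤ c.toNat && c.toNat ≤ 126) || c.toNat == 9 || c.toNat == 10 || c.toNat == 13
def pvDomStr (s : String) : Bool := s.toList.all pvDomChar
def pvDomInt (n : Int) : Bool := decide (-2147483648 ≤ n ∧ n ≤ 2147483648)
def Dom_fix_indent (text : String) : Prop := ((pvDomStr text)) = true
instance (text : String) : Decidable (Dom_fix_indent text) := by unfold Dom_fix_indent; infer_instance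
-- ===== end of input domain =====

-- B replaces A's build-line-list / pop-trailing-blanks / join pipeline by direct piece emission
-- with a deferred tail buffer (objective: alternative; same asymptotic cost).

-- ===== PORT A =====
-- '\n'.join(lines) after the while-pop of trailing blank lines
def pvRTrimBlank (lines : List String) : List String :=
  (lines.reverse.dropWhile (fun l => PySem.Str.strip l == "")).reverse

def pvStepA (st : List String × Int) (line : String) : List String × Int :=
  if st.1.isEmpty && (PySem.Str.strip line == "") then st
  else
    let indent := if st.1.isEmpty then (PySem.Str.len line - PySem.Str.len (PySem.Str.lstrip line)) else st.2
    (st.1 ++ [PySem.Str.slice line (some indent) none], indent)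

def fix_indent (text : String) : String :=
  let st := (PySem.Str.splitlines text).foldl pvStepA ([], 0)
  PySem.Str.join "\n" (pvRTrimBlank st.1) ++ "\n"

-- ===== PORT B =====
-- state: (chunks, tail, indent?) exactly as in Source B
def pvStepB (st : List String × List String × Option Int) (line : String) :
    List String × List String × Option Int :=
  match st.2.2 with
  | none =>
    if PySem.Str.strip line == "" then st
    else
      let ind := PySem.Str.len line - PySem.Str.len (PySem.Str.lstrip line)
      (st.1 ++ [PySem.Str.slice line (some ind) none], st.2.1, some ind)
  | some ind =>
    let cut := PySem.Str.slice line (some ind) none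
    let tail := st.2.1 ++ ["\n" ++ cut]
    if PySem.Str.strip cut == "" then (st.1, tail, some ind)
    else (st.1 ++ tail, [], some ind)

def fix_indent_alt (text : String) : String :=
  let st := (PySem.Str.splitlines text).foldl pvStepB ([], [], none)
  PySem.Str.join "" st.1 ++ "\n"

-- ===== PRECONDITION & SPEC =====
def Spec_fix_indent (text : String) (out : String) : Prop := out = fix_indent_alt text
instance (text : String) (out : String) : Decidable (Spec_fix_indent text out) := by unfold Spec_fix_indent; infer_instance

-- ===== CLAIM (what is proved, stated in full; the proofs are below) =====
def Claim_equal_fix_indent : Prop := ∀ (text : String), Dom_fix_indent text → Spec_fix_indent text (fix_indent text)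

-- ===== LEMMAS AND PROOFS =====

-- abbreviations used only in the proofs
def pvBlank (s : String) : Bool := PySem.Str.strip s == ""
def pvCut (ind : Int) (line : String) : String := PySem.Str.slice line (some ind) none
-- number of kept (non-blank-suffix) cuts
def pvKeep (cuts : List String) : Nat := cuts.length - (cuts.reverse.takeWhile pvBlank).length

-- once A's accumulator is non-empty, A's fold maps the fixed indent over the rest
theorem pvFoldA_nonempty (ls : List String) (acc : List String) (ind : Int) (h : acc ≠ []) :
    ls.foldl pvStepA (acc, ind) = (acc ++ ls.map (pvCut ind), ind) := by
  induction ls generalizing acc with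
  | nil => simp
  | cons l ls ih =>
    have hne : acc.isEmpty = false := by simpa [List.isEmpty_iff] using h
    rw [List.foldl_cons, show pvStepA (acc, ind) l = (acc ++ [pvCut ind l], ind) by
      simp [pvStepA, pvCut, hne], ih _ (by simp)]
    simp

-- pvKeep bookkeeping
theorem pvKeep_le (cuts : List String) : pvKeep cuts ≤ cuts.length := by
  simp [pvKeep]

theorem pvKeep_append_blank (cuts : List String) (cx : String) (h : pvBlank cx = true) :
    pvKeep (cuts ++ [cx]) = pvKeep cuts := by
  have := (List.takeWhile_prefix (p := pvBlank) (l := cuts.reverse)).length_le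
  simp [pvKeep, h] at this ⊢

theorem pvKeep_append_nonblank (cuts : List String) (cx : String) (h : pvBlank cx = false) :
    pvKeep (cuts ++ [cx]) = cuts.length + 1 := by
  simp [pvKeep, h]

-- closed form of B's fold once the indent is set (reverse induction fits the tail buffer)
theorem pvFoldB_some (ls : List String) (c t : List String) (ind : Int) :
    ls.foldl pvStepB (c, t, some ind) =
      (let cuts := ls.map (pvCut ind)
       let k := pvKeep cuts
       (if k = 0 then c else c ++ t ++ (cuts.take k).map ("\n" ++ ·),
        if k = 0 then t ++ cuts.map ("\n" ++ ·) else (cuts.drop k).map ("\n" ++ ·),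
        some ind)) := by
  induction ls using List.reverseRecOn generalizing c t with
  | nil => simp [pvKeep]
  | append_singleton ls x ih =>
    rw [List.foldl_append, ih]
    simp only [List.foldl_cons, List.foldl_nil]
    by_cases hb : pvBlank (pvCut ind x) = true
    · have hb2 : PySem.Str.strip (PySem.Str.slice x (some ind)) = "" := by
        simpa [pvBlank, pvCut] using hb
      have hstep : ∀ C T, pvStepB (C, T, some ind) x = (C, T ++ ["\n" ++ pvCut ind x], some ind) := by
        intro C T
        simp [pvStepB, pvCut, hb2]
      rw [hstep]
      have hkeep : pvKeep (ls.map (pvCut ind) ++ [pvCut ind x]) = pvKeep (ls.map (pvCut ind)) :=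
        pvKeep_append_blank _ _ hb
      by_cases hk : pvKeep (ls.map (pvCut ind)) = 0
      · simp [List.map_append, hkeep, hk]
      · have hle : pvKeep (ls.map (pvCut ind)) ≤ (ls.map (pvCut ind)).length := pvKeep_le _
        simp only [List.map_append, hkeep, if_neg hk, List.map_cons, List.map_nil]
        rw [List.take_append_of_le_length (by simpa using hle),
          List.drop_append_of_le_length (by simpa using hle)]
        simp
    · have hb' : pvBlank (pvCut ind x) = false := by simpa using hb
      have hb2 : ¬ PySem.Str.strip (PySem.Str.slice x (some ind)) = "" := by
        simpa [pvBlank, pvCut] using hb'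
      have hstep : ∀ C T, pvStepB (C, T, some ind) x =
          (C ++ (T ++ ["\n" ++ pvCut ind x]), [], some ind) := by
        intro C T
        simp [pvStepB, pvCut, hb2]
      rw [hstep]
      have hkeep : pvKeep (ls.map (pvCut ind) ++ [pvCut ind x]) = (ls.map (pvCut ind)).length + 1 :=
        pvKeep_append_nonblank _ _ hb'
      simp only [List.map_append, List.map_cons, List.map_nil]
      rw [hkeep]
      simp only [Nat.succ_ne_zero, if_false]
      have htake : List.take ((ls.map (pvCut ind)).length + 1) (ls.map (pvCut ind) ++ [pvCut ind x]) =
          ls.map (pvCut ind) ++ [pvCut ind x] := List.take_of_length_le (by simp)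
      have hdrop : List.drop ((ls.map (pvCut ind)).length + 1) (ls.map (pvCut ind) ++ [pvCut ind x]) =
          ([] : List String) := List.drop_of_length_le (by simp)
      rw [htake, hdrop]
      by_cases hk : pvKeep (ls.map (pvCut ind)) = 0
      · simp [hk]
      · have h3 : List.map ("\n" ++ ·) (List.take (pvKeep (ls.map (pvCut ind))) (ls.map (pvCut ind))) ++
            (List.map ("\n" ++ ·) (List.drop (pvKeep (ls.map (pvCut ind))) (ls.map (pvCut ind))) ++
              ["\n" ++ pvCut ind x]) =
            List.map ("\n" ++ ·) (ls.map (pvCut ind)) ++ ["\n" ++ pvCut ind x] := by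
          rw [← List.append_assoc, ← List.map_append, List.take_append_drop]
        simp only [if_neg hk, List.map_append, List.map_cons, List.map_nil, List.append_assoc, h3]

-- joining with "" after prefixing '\n' to each later piece equals '\n'.join
theorem pvJoinAux (b : List Char) (bs : List (List Char)) :
    PySem.Chars.join [] ((b :: bs).map (fun x => '\n' :: x)) =
      '\n' :: PySem.Chars.join ['\n'] (b :: bs) := by
  induction bs generalizing b with
  | nil => simp [PySem.Chars.join_singleton]
  | cons b' bs ih =>
    rw [List.map_cons, PySem.Chars.join_cons_cons, List.map_cons, PySem.Chars.join_cons_cons]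
    rw [show ((fun x => '\n' :: x) b' :: bs.map (fun x => '\n' :: x)) = ((b'::bs).map (fun x => '\n' :: x)) by simp]
    rw [ih b']
    simp

theorem pvJoinNLChars (c0 : List Char) (bs : List (List Char)) :
    PySem.Chars.join ['\n'] (c0 :: bs) = PySem.Chars.join [] (c0 :: bs.map (fun b => '\n' :: b)) := by
  cases bs with
  | nil => simp [PySem.Chars.join_singleton]
  | cons b bs =>
    rw [PySem.Chars.join_cons_cons, List.map_cons, PySem.Chars.join_cons_cons,
      show ('\n' :: b) :: bs.map (fun b => '\n' :: b) = (b :: bs).map (fun b => '\n' :: b) by simp,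
      pvJoinAux]
    simp

theorem pvJoinNL (c0 : String) (bs : List String) :
    PySem.Str.join "\n" (c0 :: bs) = PySem.Str.join "" (c0 :: bs.map ("\n" ++ ·)) := by
  apply String.ext
  have h1 := PySem.Str.toList_join "\n" (c0 :: bs)
  have h2 := PySem.Str.toList_join "" (c0 :: bs.map ("\n" ++ ·))
  rw [h1, h2, show "\n".toList = ['\n'] from rfl, show "".toList = ([] : List Char) from rfl]
  have h3 := pvJoinNLChars c0.toList (bs.map String.toList)
  simp only [List.map_cons, List.map_map] at h3 ⊢
  have hfun : (String.toList ∘ fun x => "\n" ++ x) = ((fun b => '\n' :: b) ∘ String.toList) := by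
    funext x
    simp
  rw [hfun]
  exact h3

-- rtrim of a list with non-blank head, via pvKeep
theorem pvRTrim_cons (c0 : String) (cuts : List String) (h : pvBlank c0 = false) :
    pvRTrimBlank (c0 :: cuts) = c0 :: cuts.take (pvKeep cuts) := by
  have hdw : (cuts.reverse ++ [c0]).dropWhile pvBlank = cuts.reverse.dropWhile pvBlank ++ [c0] := by
    rw [List.dropWhile_append]
    by_cases he : (cuts.reverse.dropWhile pvBlank).isEmpty
    · simp_all [List.dropWhile_cons, h]
    · simp [he]
  have hsplit : (cuts.reverse.dropWhile pvBlank).reverse ++ (cuts.reverse.takeWhile pvBlank).reverse = cuts := by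
    rw [← List.reverse_append, List.takeWhile_append_dropWhile, List.reverse_reverse]
  have hlen : (cuts.reverse.dropWhile pvBlank).reverse.length = pvKeep cuts := by
    have h1 : (List.takeWhile pvBlank cuts.reverse).length + (List.dropWhile pvBlank cuts.reverse).length
        = cuts.length := by
      have := congrArg List.length (List.takeWhile_append_dropWhile (p := pvBlank) (l := cuts.reverse))
      rw [List.length_append] at this
      simpa using this
    simp only [List.length_reverse, pvKeep]
    omega
  have htake := List.take_left' (l₂ := (List.takeWhile pvBlank cuts.reverse).reverse) hlen
  rw [hsplit] at htake
  simp only [pvRTrimBlank, List.reverse_cons,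
    show (fun l => PySem.Str.strip l == "") = pvBlank from rfl, hdw]
  simp [htake]

theorem pvDropSub (p : Char → Bool) (cs : List Char) :
    cs.drop (cs.length - (cs.dropWhile p).length) = cs.dropWhile p := by
  have hsum : (cs.takeWhile p).length + (cs.dropWhile p).length = cs.length := by
    have := congrArg List.length (List.takeWhile_append_dropWhile (p := p) (l := cs))
    rw [List.length_append] at this
    simpa using this
  calc cs.drop (cs.length - (cs.dropWhile p).length)
      = (cs.takeWhile p ++ cs.dropWhile p).drop (cs.length - (cs.dropWhile p).length) := by
        rw [List.takeWhile_append_dropWhile]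
    _ = cs.dropWhile p := List.drop_left' (by omega)

theorem pvDropWhileIdem (p : Char → Bool) (cs : List Char) :
    (cs.dropWhile p).dropWhile p = cs.dropWhile p := by
  induction cs with
  | nil => simp
  | cons a t ih =>
    by_cases hp : p a = true
    · simp [List.dropWhile_cons, hp, ih]
    · simp [List.dropWhile_cons, hp]

-- the first kept cut is non-blank
theorem pvCut_first_nonblank (l : String) (h : (PySem.Str.strip l == "") = false) :
    pvBlank (pvCut (PySem.Str.len l - PySem.Str.len (PySem.Str.lstrip l)) l) = false := by
  have hdwle : (List.dropWhile PySem.Chars.isspace l.toList).length ≤ l.toList.length :=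
    (List.dropWhile_suffix _).length_le
  simp only [pvBlank, pvCut, PySem.Str.strip, PySem.Str.lstrip, PySem.Str.len, PySem.Str.slice,
    PySem.Chars.strip, PySem.Chars.lstrip, PySem.Chars.slice] at h ⊢
  rw [String.toList_ofList, String.toList_ofList]
  rw [PySem.List.slice_from (ha := by push_cast; omega)]
  rw [show ((↑l.toList.length - ↑(List.dropWhile PySem.Chars.isspace l.toList).length : Int)).toNat
      = l.toList.length - (List.dropWhile PySem.Chars.isspace l.toList).length by omega]
  rw [pvDropSub, pvDropWhileIdem]
  exact h

theorem pvMain (ls : List String) :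
    PySem.Str.join "\n" (pvRTrimBlank (ls.foldl pvStepA ([], 0)).1) =
      PySem.Str.join "" (ls.foldl pvStepB ([], [], none)).1 := by
  induction ls with
  | nil => rfl
  | cons l ls ih =>
    by_cases hb : (PySem.Str.strip l == "") = true
    · rw [List.foldl_cons, List.foldl_cons,
        show pvStepA ([], 0) l = ([], 0) by simp [pvStepA, hb],
        show pvStepB ([], [], none) l = ([], [], none) by simp [pvStepB, hb]]
      exact ih
    · rw [List.foldl_cons, List.foldl_cons]
      simp only [Bool.not_eq_true] at hb
      set ind := PySem.Str.len l - PySem.Str.len (PySem.Str.lstrip l) with hind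
      rw [show pvStepA ([], 0) l = ([pvCut ind l], ind) by
          simp only [pvStepA, List.isEmpty_nil, Bool.true_and, hb, Bool.false_eq_true,
            if_false, if_true, List.nil_append]
          rw [← hind]
          rfl,
        show pvStepB ([], [], none) l = ([pvCut ind l], [], some ind) by
          simp only [pvStepB, hb, Bool.false_eq_true, if_false, List.nil_append]
          rw [← hind]
          rfl]
      rw [pvFoldA_nonempty _ _ _ (by simp), pvFoldB_some]
      have hnb : pvBlank (pvCut ind l) = false := pvCut_first_nonblank l hb
      simp only [List.singleton_append]
      rw [pvRTrim_cons _ _ hnb]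
      by_cases hk : pvKeep (ls.map (pvCut ind)) = 0
      · simp [hk, pvJoinNL]
      · simp only [if_neg hk]
        rw [pvJoinNL]

-- ===== VERDICT (by name: the statement is the Claim_ definition above) =====
theorem fix_indent_spec : Claim_equal_fix_indent := by
  intro text _
  unfold Spec_fix_indent fix_indent fix_indent_alt
  simpa using pvMain (PySem.Str.splitlines text)
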